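-- pv_equiv track=rewrite | github.com/MdAbedin/binarysearch | 0779 Non-Overlapping Pairs of Sublists.py | solve
-- ===== SOURCE A (Python) =====
-- def solve(nums, k):
--     MOD = 10**9+7
--     streak, sublists_before = 0,0
--     prev_streak_ans = 0
--     ans = 0
--
--     for num in nums:
--         if num >= k:
--             streak += 1
--
--             cur_streak_ans = prev_streak_ans + (streak-1)*streak//2
--             cur_streak_ans %= MOD
--             prev_streak_ans = cur_streak_ans
--
--             ans += cur_streak_ans + streak * sublists_before
--             ans %= MOD
--         else:
--             sublists_before += streak*(streak+1)//2
--             sublists_before %= MOD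
--             streak = 0
--             prev_streak_ans = 0
--
--     return ans
-- ===== SOURCE B (Python) =====
-- def solve(nums, k):
--     MOD = 10**9 + 7
--     # compress into run lengths of maximal blocks with num >= k
--     runs = []
--     L = 0
--     for num in nums:
--         if num >= k:
--             L += 1
--         else:
--             if L:
--                 runs.append(L)
--             L = 0
--     if L:
--         runs.append(L)
--     T = 0      # total sublists over all runs
--     S = 0      # sum of squares of per-run sublist counts
--     within = 0 # pairs of non-overlapping sublists inside a single run
--     for L in runs:
--         c = L * (L + 1) // 2
--         T += c
--         S += c * c
--         within += (L + 2) * (L + 1) * L * (L - 1) // 24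
--     return (within + (T * T - S) // 2) % MOD
-- ===== Notes on version B (the rewrite author's own statement) =====
-- stated objective: faster
-- what changed: A's single pass maintaining four modular running variables (streak, sublists_before, prev_streak_ans, ans) with per-element modular reductions is replaced by run-length compression of the >=k blocks followed by closed-form counts per run: within-run pairs (L+2)(L+1)L(L-1)//24 and cross-run pairs (T^2 - sum c_i^2)//2 over exact integers, with the modulus taken once at the end.
import Mathlib
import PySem

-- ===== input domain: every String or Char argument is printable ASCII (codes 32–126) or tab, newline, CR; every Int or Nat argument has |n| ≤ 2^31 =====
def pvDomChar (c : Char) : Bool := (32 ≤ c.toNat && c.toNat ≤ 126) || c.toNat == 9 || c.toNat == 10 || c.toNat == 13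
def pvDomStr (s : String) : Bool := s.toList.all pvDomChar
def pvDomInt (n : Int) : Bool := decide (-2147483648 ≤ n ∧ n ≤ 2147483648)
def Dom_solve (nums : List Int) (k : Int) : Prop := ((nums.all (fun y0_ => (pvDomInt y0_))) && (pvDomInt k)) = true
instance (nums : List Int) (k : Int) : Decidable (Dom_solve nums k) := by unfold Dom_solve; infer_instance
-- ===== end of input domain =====

-- B replaces A's four-variable modular running-state loop by run-length compression plus
-- closed-form counts per run (within-run pairs and cross-run products), mod taken once at the end.

-- ===== PORT A =====
def solve (nums : List Int) (k : Int) : Int :=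
  let MOD : Int := 10 ^ 9 + 7
  let st := nums.foldl (fun (s : Int × Int × Int × Int) num =>
    if num ≥ k then
      let streak := s.1 + 1
      let cur := PySem.Int.mod (s.2.2.1 + PySem.Int.floordiv ((streak - 1) * streak) 2) MOD
      let ans := PySem.Int.mod (s.2.2.2 + (cur + streak * s.2.1)) MOD
      (streak, s.2.1, cur, ans)
    else
      let sb := PySem.Int.mod (s.2.1 + PySem.Int.floordiv (s.1 * (s.1 + 1)) 2) MOD
      (0, sb, 0, s.2.2.2)) ((0 : Int), (0 : Int), (0 : Int), (0 : Int))
  st.2.2.2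

-- ===== PORT B =====
def solve_alt (nums : List Int) (k : Int) : Int :=
  let MOD : Int := 10 ^ 9 + 7
  let p := nums.foldl (fun (s : List Int × Int) num =>
      if num ≥ k then (s.1, s.2 + 1)
      else ((if s.2 ≠ 0 then s.1 ++ [s.2] else s.1), (0 : Int))) (([] : List Int), (0 : Int))
  let runs := if p.2 ≠ 0 then p.1 ++ [p.2] else p.1
  let q := runs.foldl (fun (s : Int × Int × Int) L =>
      let c := PySem.Int.floordiv (L * (L + 1)) 2
      (s.1 + c, s.2.1 + c * c,
       s.2.2 + PySem.Int.floordiv ((L + 2) * (L + 1) * L * (L - 1)) 24)) ((0 : Int), (0 : Int), (0 : Int))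
  PySem.Int.mod (q.2.2 + PySem.Int.floordiv (q.1 * q.1 - q.2.1) 2) MOD

-- ===== PRECONDITION & SPEC =====
def Spec_solve (nums : List Int) (k : Int) (out : Int) : Prop := out = solve_alt nums k
instance (nums : List Int) (k : Int) (out : Int) : Decidable (Spec_solve nums k out) := by unfold Spec_solve; infer_instance

-- ===== CLAIM (what is proved, stated in full; the proofs are below) =====
def Claim_equal_solve : Prop := ∀ (nums : List Int) (k : Int), Dom_solve nums k → Spec_solve nums k (solve nums k)

-- ===== LEMMAS AND PROOFS =====

def pvM : Int := 10 ^ 9 + 7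

/-- A's loop body, named (definitionally equal to the lambda in `solve`). -/
def pvAstep (k : Int) (s : Int × Int × Int × Int) (num : Int) : Int × Int × Int × Int :=
  if num ≥ k then
    let streak := s.1 + 1
    let cur := PySem.Int.mod (s.2.2.1 + PySem.Int.floordiv ((streak - 1) * streak) 2) pvM
    let ans := PySem.Int.mod (s.2.2.2 + (cur + streak * s.2.1)) pvM
    (streak, s.2.1, cur, ans)
  else
    let sb := PySem.Int.mod (s.2.1 + PySem.Int.floordiv (s.1 * (s.1 + 1)) 2) pvM
    (0, sb, 0, s.2.2.2)

/-- B's first-loop body, named. -/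
def pvBstep (k : Int) (s : List Int × Int) (num : Int) : List Int × Int :=
  if num ≥ k then (s.1, s.2 + 1)
  else ((if s.2 ≠ 0 then s.1 ++ [s.2] else s.1), (0 : Int))

/-- B's second-loop body, named. -/
def pvCstep (s : Int × Int × Int) (L : Int) : Int × Int × Int :=
  let c := PySem.Int.floordiv (L * (L + 1)) 2
  (s.1 + c, s.2.1 + c * c,
   s.2.2 + PySem.Int.floordiv ((L + 2) * (L + 1) * L * (L - 1)) 24)

theorem pv_solve_eq (nums : List Int) (k : Int) :
    solve nums k = (nums.foldl (pvAstep k) (0, 0, 0, 0)).2.2.2 := rfl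

theorem pv_solve_alt_eq (nums : List Int) (k : Int) :
    solve_alt nums k =
      (let p := nums.foldl (pvBstep k) ([], 0)
       let runs := if p.2 ≠ 0 then p.1 ++ [p.2] else p.1
       let q := runs.foldl pvCstep (0, 0, 0)
       PySem.Int.mod (q.2.2 + PySem.Int.floordiv (q.1 * q.1 - q.2.1) 2) pvM) := rfl

/-- number of sublists of a run of length n : n(n+1)/2 -/
def pvTri : Nat → Int
  | 0 => 0
  | n + 1 => pvTri n + ((n : Int) + 1)

/-- A's prev_streak_ans after n streak steps -/
def pvPsa : Nat → Int
  | 0 => 0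
  | n + 1 => pvPsa n + pvTri n

/-- within-run pair count for a run of length n -/
def pvW : Nat → Int
  | 0 => 0
  | n + 1 => pvW n + pvPsa (n + 1)

def pvT (rs : List Nat) : Int := (rs.map pvTri).sum
def pvS (rs : List Nat) : Int := (rs.map (fun r => pvTri r * pvTri r)).sum
def pvWsum (rs : List Nat) : Int := (rs.map pvW).sum
def pvX : List Nat → Int
  | [] => 0
  | r :: rs => pvTri r * pvT rs + pvX rs

def pvCast (rs : List Nat) : List Int := rs.map (fun r : Nat => (r : Int))

/-- run compression at the Nat level, mirroring B's first loop -/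
def pvRunsStep (k : Int) (s : List Nat × Nat) (num : Int) : List Nat × Nat :=
  if num ≥ k then (s.1, s.2 + 1)
  else ((if s.2 ≠ 0 then s.1 ++ [s.2] else s.1), 0)

/-- characterisation of A's loop state after seeing completed runs rs and a current streak L -/
def pvAstate (rs : List Nat) (L : Nat) : Int × Int × Int × Int :=
  (((L : Nat) : Int), PySem.Int.mod (pvT rs) pvM, PySem.Int.mod (pvPsa L) pvM,
   PySem.Int.mod (pvWsum rs + pvX rs + pvW L + pvTri L * pvT rs) pvM)

theorem pv_two_mul_tri (n : Nat) : 2 * pvTri n = (n : Int) * ((n : Int) + 1) := by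
  induction n with
  | zero => simp [pvTri]
  | succ n ih => simp only [pvTri]; push_cast; push_cast at ih; linear_combination ih

theorem pv_six_mul_psa (n : Nat) : 6 * pvPsa n = ((n : Int) + 1) * (n : Int) * ((n : Int) - 1) := by
  induction n with
  | zero => simp [pvPsa]
  | succ n ih =>
    simp only [pvPsa]; push_cast; push_cast at ih
    linear_combination ih + 3 * pv_two_mul_tri n

theorem pv_24_mul_W (n : Nat) :
    24 * pvW n = ((n : Int) + 2) * ((n : Int) + 1) * (n : Int) * ((n : Int) - 1) := by
  induction n with
  | zero => simp [pvW]
  | succ n ih =>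
    simp only [pvW]; push_cast; push_cast at ih
    have h6 := pv_six_mul_psa (n + 1)
    push_cast at h6
    linear_combination ih + 4 * h6

theorem pv_fdiv_exact (b a q : Int) (hb : 0 < b) (h : a = b * q) :
    PySem.Int.floordiv a b = q := by
  rw [h, PySem.Int.floordiv_eq_ediv_of_pos hb]
  exact Int.mul_ediv_cancel_left q (by omega)

theorem pv_fdiv_tri (n : Nat) :
    PySem.Int.floordiv ((n : Int) * ((n : Int) + 1)) 2 = pvTri n :=
  pv_fdiv_exact 2 _ _ (by norm_num) (by linear_combination - pv_two_mul_tri n)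

theorem pv_fdiv_W (n : Nat) :
    PySem.Int.floordiv (((n : Int) + 2) * ((n : Int) + 1) * (n : Int) * ((n : Int) - 1)) 24 = pvW n :=
  pv_fdiv_exact 24 _ _ (by norm_num) (by linear_combination - pv_24_mul_W n)

theorem pv_sq_sub (rs : List Nat) : pvT rs * pvT rs - pvS rs = 2 * pvX rs := by
  induction rs with
  | nil => simp [pvT, pvS, pvX]
  | cons r rs ih =>
    simp only [pvT, pvS, pvX, List.map_cons, List.sum_cons] at *
    linear_combination ih

theorem pvT_append (rs : List Nat) (r : Nat) : pvT (rs ++ [r]) = pvT rs + pvTri r := by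
  simp [pvT]

theorem pvWsum_append (rs : List Nat) (r : Nat) : pvWsum (rs ++ [r]) = pvWsum rs + pvW r := by
  simp [pvWsum]

theorem pvX_append (rs : List Nat) (r : Nat) : pvX (rs ++ [r]) = pvX rs + pvTri r * pvT rs := by
  induction rs with
  | nil => simp [pvX, pvT]
  | cons a rs ih =>
    simp only [List.cons_append, pvX, ih, pvT, List.map_cons, List.sum_cons, List.map_append,
      List.sum_append, List.map_nil, List.sum_nil]
    ring

theorem pv_mod_emod (a : Int) : PySem.Int.mod a pvM = a % pvM :=
  PySem.Int.mod_eq_emod_of_pos (by norm_num [pvM])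

theorem pv_modeq_self (a : Int) : Int.ModEq pvM (a % pvM) a :=
  Int.emod_emod_of_dvd a dvd_rfl

theorem pv_astep_ge (k num : Int) (h : num ≥ k) (rs : List Nat) (L : Nat) :
    pvAstep k (pvAstate rs L) num = pvAstate rs (L + 1) := by
  simp only [pvAstep, pvAstate, if_pos h]
  have e1 : ((L : Int) + 1 - 1) * ((L : Int) + 1) = (L : Int) * ((L : Int) + 1) := by ring
  rw [e1, pv_fdiv_tri L]
  have hcur : PySem.Int.mod (PySem.Int.mod (pvPsa L) pvM + pvTri L) pvM
      = PySem.Int.mod (pvPsa (L + 1)) pvM := by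
    rw [pv_mod_emod, pv_mod_emod, pv_mod_emod]
    exact ((pv_modeq_self (pvPsa L)).add_right (pvTri L)).trans (by rw [pvPsa])
  rw [hcur]
  refine Prod.ext (by push_cast; ring) (Prod.ext rfl (Prod.ext rfl ?_))
  show PySem.Int.mod
      (PySem.Int.mod (pvWsum rs + pvX rs + pvW L + pvTri L * pvT rs) pvM +
        (PySem.Int.mod (pvPsa (L + 1)) pvM + ((L : Int) + 1) * PySem.Int.mod (pvT rs) pvM)) pvM
    = PySem.Int.mod (pvWsum rs + pvX rs + pvW (L + 1) + pvTri (L + 1) * pvT rs) pvM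
  rw [pv_mod_emod, pv_mod_emod, pv_mod_emod, pv_mod_emod, pv_mod_emod]
  have hm : Int.ModEq pvM
      ((pvWsum rs + pvX rs + pvW L + pvTri L * pvT rs) % pvM +
        (pvPsa (L + 1) % pvM + ((L : Int) + 1) * (pvT rs % pvM)))
      ((pvWsum rs + pvX rs + pvW L + pvTri L * pvT rs) +
        (pvPsa (L + 1) + ((L : Int) + 1) * pvT rs)) :=
    (pv_modeq_self _).add ((pv_modeq_self _).add ((Int.ModEq.refl _).mul (pv_modeq_self _)))
  rw [hm]
  congr 1
  simp only [pvW, pvTri]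
  ring

theorem pv_astep_lt (k num : Int) (h : ¬ num ≥ k) (rs : List Nat) (L : Nat) :
    pvAstep k (pvAstate rs L) num = pvAstate (if L ≠ 0 then rs ++ [L] else rs) 0 := by
  simp only [pvAstep, pvAstate, if_neg h]
  have hsb : PySem.Int.mod (PySem.Int.mod (pvT rs) pvM + PySem.Int.floordiv ((L : Int) * ((L : Int) + 1)) 2) pvM
      = PySem.Int.mod (pvT (if L ≠ 0 then rs ++ [L] else rs)) pvM := by
    rw [pv_fdiv_tri L, pv_mod_emod, pv_mod_emod, pv_mod_emod]
    refine ((pv_modeq_self (pvT rs)).add_right (pvTri L)).trans ?_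
    by_cases hL : L = 0
    · simp [hL, pvTri]
    · simp [hL, pvT_append]
  rw [hsb]
  refine Prod.ext (by simp) (Prod.ext rfl (Prod.ext (by simp [pvPsa, pv_mod_emod]) ?_))
  show PySem.Int.mod (pvWsum rs + pvX rs + pvW L + pvTri L * pvT rs) pvM
    = PySem.Int.mod (pvWsum (if L ≠ 0 then rs ++ [L] else rs) + pvX (if L ≠ 0 then rs ++ [L] else rs)
        + pvW 0 + pvTri 0 * pvT (if L ≠ 0 then rs ++ [L] else rs)) pvM
  congr 1
  by_cases hL : L = 0
  · simp [hL, pvW, pvTri]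
  · simp only [hL, ne_eq, not_false_eq_true, if_pos, pvWsum_append, pvX_append, pvW, pvTri]
    ring

/-- B's first loop computes the Int-cast of the Nat-level run compression. -/
theorem pv_bfold (k : Int) (nums : List Int) : ∀ (rs : List Nat) (L : Nat),
    nums.foldl (pvBstep k) (pvCast rs, ((L : Nat) : Int))
    = (pvCast (nums.foldl (pvRunsStep k) (rs, L)).1,
       (((nums.foldl (pvRunsStep k) (rs, L)).2 : Nat) : Int)) := by
  induction nums with
  | nil => simp
  | cons num nums ih =>
    intro rs L
    rw [List.foldl_cons, List.foldl_cons]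
    by_cases h : num ≥ k
    · have h1 : pvBstep k (pvCast rs, ((L : Nat) : Int)) num
          = ((pvCast rs), (((L + 1 : Nat) : Nat) : Int)) := by
        simp [pvBstep, h]
      have h2 : pvRunsStep k (rs, L) num = (rs, L + 1) := by simp [pvRunsStep, h]
      rw [h1, h2]; exact ih rs (L + 1)
    · have h2 : pvRunsStep k (rs, L) num = ((if L ≠ 0 then rs ++ [L] else rs), 0) := by
        simp [pvRunsStep, h]
      have h1 : pvBstep k (pvCast rs, ((L : Nat) : Int)) num
          = (pvCast (if L ≠ 0 then rs ++ [L] else rs), (((0 : Nat) : Nat) : Int)) := by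
        by_cases hL : L = 0
        · simp [pvBstep, h, hL]
        · simp [pvBstep, h, hL, pvCast]
      rw [h1, h2]; exact ih _ 0

/-- A's loop preserves the state characterisation along the Nat-level run compression. -/
theorem pv_afold (k : Int) (nums : List Int) : ∀ (rs : List Nat) (L : Nat),
    nums.foldl (pvAstep k) (pvAstate rs L)
    = pvAstate (nums.foldl (pvRunsStep k) (rs, L)).1 (nums.foldl (pvRunsStep k) (rs, L)).2 := by
  induction nums with
  | nil => simp
  | cons num nums ih =>
    intro rs L
    rw [List.foldl_cons, List.foldl_cons]
    by_cases h : num ≥ k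
    · have h2 : pvRunsStep k (rs, L) num = (rs, L + 1) := by simp [pvRunsStep, h]
      rw [pv_astep_ge k num h, h2]; exact ih rs (L + 1)
    · have h2 : pvRunsStep k (rs, L) num = ((if L ≠ 0 then rs ++ [L] else rs), 0) := by
        simp [pvRunsStep, h]
      rw [pv_astep_lt k num h, h2]; exact ih _ 0

/-- B's second loop sums the closed forms. -/
theorem pv_fold2 (rs : List Nat) : ∀ (t s w : Int),
    (pvCast rs).foldl pvCstep (t, s, w)
    = (t + pvT rs, s + pvS rs, w + pvWsum rs) := by
  induction rs with
  | nil => simp [pvCast, pvT, pvS, pvWsum]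
  | cons r rs ih =>
    intro t s w
    rw [show pvCast (r :: rs) = ((r : Nat) : Int) :: pvCast rs from rfl, List.foldl_cons]
    have h1 : pvCstep (t, s, w) ((r : Nat) : Int) = (t + pvTri r, s + pvTri r * pvTri r, w + pvW r) := by
      simp only [pvCstep, pv_fdiv_tri, pv_fdiv_W]
    rw [h1, ih]
    simp only [pvT, pvS, pvWsum, List.map_cons, List.sum_cons, Prod.mk.injEq]
    refine ⟨by ring, by ring, by ring⟩

theorem pv_final (rs : List Nat) (L : Nat) :
    PySem.Int.mod (pvWsum rs + pvX rs + pvW L + pvTri L * pvT rs) pvM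
    = PySem.Int.mod
      (pvWsum (if L ≠ 0 then rs ++ [L] else rs) +
        PySem.Int.floordiv (pvT (if L ≠ 0 then rs ++ [L] else rs) * pvT (if L ≠ 0 then rs ++ [L] else rs)
          - pvS (if L ≠ 0 then rs ++ [L] else rs)) 2) pvM := by
  symm
  set rf := if L ≠ 0 then rs ++ [L] else rs with hrf
  rw [pv_fdiv_exact 2 _ (pvX rf) (by norm_num) (by linear_combination pv_sq_sub rf)]
  congr 1
  by_cases hL : L = 0
  · simp only [hrf, hL, ne_eq, not_true_eq_false, if_false, pvW, pvTri]
    ring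
  · simp only [hrf, hL, ne_eq, not_false_eq_true, if_pos, pvWsum_append, pvX_append]
    ring

-- ===== VERDICT (by name: the statement is the Claim_ definition above) =====
theorem solve_spec : Claim_equal_solve := by
  unfold Claim_equal_solve
  intro nums k _
  unfold Spec_solve
  rw [pv_solve_eq, pv_solve_alt_eq]
  have hinit : ((0 : Int), (0 : Int), (0 : Int), (0 : Int)) = pvAstate [] 0 := by
    simp [pvAstate, pvT, pvPsa, pvWsum, pvX, pvW, pvTri, pv_mod_emod]
  have hinitB : ((([] : List Int)), (0 : Int)) = (pvCast [], (((0 : Nat) : Nat) : Int)) := by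
    simp [pvCast]
  rw [hinit, pv_afold, hinitB, pv_bfold]
  set rs := (nums.foldl (pvRunsStep k) ([], 0)).1 with hrs
  set L := (nums.foldl (pvRunsStep k) ([], 0)).2 with hL
  simp only [pvAstate]
  have hcast : ((L : Int) ≠ 0) ↔ (L ≠ 0) := by exact_mod_cast Int.natCast_ne_zero
  by_cases hL0 : L = 0
  · have : ((L : Int)) = 0 := by exact_mod_cast hL0
    rw [if_neg (by simp [this])]
    have := pv_final rs L
    rw [if_neg (by simp [hL0])] at this
    rw [pv_fold2]
    simpa using this
  · have hLI : ((L : Int)) ≠ 0 := by exact_mod_cast hL0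
    rw [if_pos hLI]
    have hmap : pvCast rs ++ [((L : Nat) : Int)]
        = pvCast (rs ++ [L]) := by simp [pvCast]
    rw [hmap, pv_fold2]
    have := pv_final rs L
    rw [if_pos hL0] at this
    simpa using this
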